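-- pv_equiv track=rewrite | github.com/EvoEvolver/EvoNote | evonote/core/utils.py | get_stringified_string_with_indent
-- ===== SOURCE A (Python) =====
-- def escape_multi_quote(s: str):
--     # find the index where 3 or more double quotes appear
--     res = []
--     search_start = 0
--     while True:
--         pos = s.find('"""', search_start)
--         if pos == -1:
--             res.append(s[search_start:])
--             break
--         else:
--             res.append(s[search_start: pos])
--             quote_start = pos
--             # pos += 3
--             while pos < len(s):
--                 if s[pos] == '"':
--                     pos += 1
--                 else:
--                     break
--             res.append('\\"' * (pos - quote_start))
--             search_start = pos
--     return ''.join(res)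
--
-- def get_stringified_string_with_indent(s: str, indent):
--     res = ['"""']
--     split = s.splitlines()
--     for line in split[:-1]:
--         res.append(escape_multi_quote(line))
--         res.append("\n")
--         res.append(" " * indent)
--     res.append(escape_multi_quote(split[-1]))
--     res.append('"""')
--     return "".join(res)
-- ===== SOURCE B (Python) =====
-- def escape_multi_quote(s: str):
--     # single left-to-right pass with a run-length counter: group maximal runs of
--     # double quotes and escape a run only when it is 3 or more quotes long
--     out = []
--     run = 0
--     for ch in s:
--         if ch == '"':
--             run += 1
--         else:
--             out.append('\\"' * run if run >= 3 else '"' * run)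
--             out.append(ch)
--             run = 0
--     out.append('\\"' * run if run >= 3 else '"' * run)
--     return ''.join(out)
--
-- def get_stringified_string_with_indent(s: str, indent):
--     lines = [escape_multi_quote(line) for line in s.splitlines()]
--     sep = "\n" + " " * indent if len(lines) > 1 else ""
--     return '"""' + sep.join(lines) + '"""'
-- ===== Notes on version B (the rewrite author's own statement) =====
-- stated objective: idiomatic
-- what changed: escape_multi_quote is re-done as a single run-length pass over characters (group maximal quote runs, escape only runs of >=3) instead of repeated str.find('"""') with an inner counting while-loop, and the line assembly becomes a sep.join over the escaped lines instead of a manual append loop over split[:-1] plus split[-1].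
-- outside the precondition, e.g. on get_stringified_string_with_indent('', 4): A raises IndexError, B returns '""""""'
import Mathlib
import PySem

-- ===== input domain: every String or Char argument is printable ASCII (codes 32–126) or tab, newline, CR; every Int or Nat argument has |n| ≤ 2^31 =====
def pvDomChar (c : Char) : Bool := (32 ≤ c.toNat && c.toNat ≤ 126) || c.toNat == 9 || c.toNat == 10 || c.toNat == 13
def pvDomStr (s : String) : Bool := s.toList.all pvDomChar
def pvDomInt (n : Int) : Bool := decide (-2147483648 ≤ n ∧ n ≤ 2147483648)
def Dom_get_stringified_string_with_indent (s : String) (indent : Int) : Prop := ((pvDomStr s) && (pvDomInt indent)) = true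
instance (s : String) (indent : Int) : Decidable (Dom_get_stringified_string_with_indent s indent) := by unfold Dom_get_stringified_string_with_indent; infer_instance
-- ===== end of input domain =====

-- B re-implements the escaping as a single run-length pass over characters and the line
-- assembly as a sep.join, instead of A's repeated find('"""') with an inner counting loop;
-- the equivalence is about the return value on non-empty strings (A raises IndexError on "").

-- ===== PORT A =====
-- inner while loop of escape_multi_quote: 'while pos < len(s): if s[pos] == '"': pos += 1 else: break'
def pvAdvance (cs : List Char) (pos : Nat) : Nat :=
  if h : pos < cs.length then
    (if cs[pos] = '"' then pvAdvance cs (pos + 1) else pos)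
  else pos
termination_by cs.length - pos

-- facts the outer loop's termination needs (stated before the port so decreasing_by can cite them)
theorem pvAdvance_ge (cs : List Char) (pos : Nat) : pos ≤ pvAdvance cs pos := by
  unfold pvAdvance
  split
  · split
    · exact le_trans (Nat.le_succ pos) (pvAdvance_ge cs (pos + 1))
    · exact le_refl _
  · exact le_refl _
termination_by cs.length - pos

theorem pvAdvance_succ (cs : List Char) (pos : Nat) (h : cs[pos]? = some '"') :
    pvAdvance cs pos = pvAdvance cs (pos + 1) := by
  have hlt : pos < cs.length := by
    by_contra hge
    rw [List.getElem?_eq_none (by omega)] at h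
    simp at h
  have hq : cs[pos] = '"' := by
    rw [List.getElem?_eq_getElem hlt] at h
    exact Option.some.inj h
  rw [pvAdvance, dif_pos hlt, if_pos hq]

theorem pvFindFrom_gt_len (cs sub : List Char) (start : Nat) (h : cs.length < start) :
    PySem.Chars.findFrom cs sub (start : Int) none = -1 := by
  simp only [PySem.Chars.findFrom]
  rw [if_pos]
  split
  · omega
  · omega

-- consolidated facts about a successful find of '"""' starting at `start`
theorem pvFind_facts (cs : List Char) (start : Nat)
    (h : PySem.Chars.findFrom cs ['"', '"', '"'] (start : Int) none ≠ -1) :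
    start ≤ cs.length ∧
      (start : Int) ≤ PySem.Chars.findFrom cs ['"', '"', '"'] (start : Int) none ∧
      ['"', '"', '"'] <+: cs.drop (PySem.Chars.findFrom cs ['"', '"', '"'] (start : Int) none).toNat ∧
      ∀ i : Nat, start ≤ i → i < (PySem.Chars.findFrom cs ['"', '"', '"'] (start : Int) none).toNat →
        ¬ ['"', '"', '"'] <+: cs.drop i := by
  have hle : start ≤ cs.length := by
    by_contra hgt
    exact h (pvFindFrom_gt_len cs _ start (by omega))
  obtain ⟨h1, h2, h3⟩ := PySem.Chars.findFrom_natCast_spec cs ['"', '"', '"'] start hle h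
  exact ⟨hle, h1, h2, fun i hi1 hi2 => h3 i hi1 hi2⟩

-- outer loop of escape_multi_quote: state = the absolute search position; chunks concatenated
def pvEscA (cs : List Char) (start : Nat) : List Char :=
  let pos := PySem.Chars.findFrom cs ['"', '"', '"'] (start : Int) none
  if hpos : pos = -1 then
    PySem.List.slice cs (some (start : Int)) none
  else
    let p := pos.toNat
    let e := pvAdvance cs p
    PySem.List.slice cs (some (start : Int)) (some pos) ++
      (List.replicate (e - p) ['\\', '"']).flatten ++ pvEscA cs e
termination_by cs.length - start
decreasing_by
  obtain ⟨hle, hsp, hpre, _⟩ := pvFind_facts cs start hpos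
  set pos := PySem.Chars.findFrom cs ['"', '"', '"'] (start : Int) none with hposdef
  have hsp' : start ≤ pos.toNat := by omega
  have hq : cs[pos.toNat]? = some '"' := by
    obtain ⟨t, ht⟩ := hpre
    have h0 : (cs.drop pos.toNat)[0]? = some '"' := by rw [← ht]; rfl
    simpa [List.getElem?_drop] using h0
  have hlt : pos.toNat < cs.length := by
    by_contra hge
    rw [List.getElem?_eq_none (by omega)] at hq
    simp at hq
  have h1 : pos.toNat + 1 ≤ pvAdvance cs pos.toNat := by
    rw [pvAdvance_succ cs pos.toNat hq]; exact pvAdvance_ge cs _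
  omega

def get_stringified_string_with_indent (s : String) (indent : Int) : String :=
  let split := PySem.Chars.splitlines s.toList
  let body := (PySem.List.slice split none (some (-1))).foldl
      (fun res line => res ++ pvEscA line 0 ++ ['\n'] ++ PySem.List.pyRepeat [' '] indent)
      ['"', '"', '"']
  match PySem.List.pyGet? split (-1) with
  | some last => String.ofList (body ++ pvEscA last 0 ++ ['"', '"', '"'])
  | none => ""  -- unreachable under Pre_ (only s = "" lands here; Python raises IndexError)

-- ===== PORT B =====
def pvEmit (run : Nat) : List Char :=
  if 3 ≤ run then (List.replicate run ['\\', '"']).flatten else List.replicate run '"'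

def pvStepB (st : List Char × Nat) (c : Char) : List Char × Nat :=
  if c = '"' then (st.1, st.2 + 1) else (st.1 ++ pvEmit st.2 ++ [c], 0)

def pvEscB (cs : List Char) : List Char :=
  let st := cs.foldl pvStepB ([], 0)
  st.1 ++ pvEmit st.2

def get_stringified_string_with_indent_alt (s : String) (indent : Int) : String :=
  let lines := (PySem.Chars.splitlines s.toList).map pvEscB
  let sep := if 1 < lines.length then '\n' :: PySem.List.pyRepeat [' '] indent else []
  String.ofList (['"', '"', '"'] ++ PySem.Chars.join sep lines ++ ['"', '"', '"'])

-- ===== PRECONDITION & SPEC =====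
-- Pre_ excludes only the empty string, on which A's split[-1] raises IndexError.
def Pre_get_stringified_string_with_indent (s : String) (indent : Int) : Prop := s ≠ ""
instance (s : String) (indent : Int) : Decidable (Pre_get_stringified_string_with_indent s indent) := by unfold Pre_get_stringified_string_with_indent; infer_instance

def pvWitness_get_stringified_string_with_indent : String × Int := ("a\"\"\"\"b\nc", 2)

def Spec_get_stringified_string_with_indent (s : String) (indent : Int) (out : String) : Prop := out = get_stringified_string_with_indent_alt s indent
instance (s : String) (indent : Int) (out : String) : Decidable (Spec_get_stringified_string_with_indent s indent out) := by unfold Spec_get_stringified_string_with_indent; infer_instance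

-- ===== CLAIM (what is proved, stated in full; the proofs are below) =====
def Claim_equal_get_stringified_string_with_indent : Prop := ∀ (s : String) (indent : Int), Dom_get_stringified_string_with_indent s indent → Pre_get_stringified_string_with_indent s indent → Spec_get_stringified_string_with_indent s indent (get_stringified_string_with_indent s indent)

-- ===== LEMMAS AND PROOFS =====

-- length of the leading run of double quotes
def pvLead (cs : List Char) : Nat := (cs.takeWhile (fun c => c == '"')).length

theorem pvLead_nil : pvLead [] = 0 := rfl

theorem pvLead_cons (c : Char) (cs : List Char) :
    pvLead (c :: cs) = if c = '"' then pvLead cs + 1 else 0 := by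
  simp [pvLead, List.takeWhile_cons]
  split <;> simp_all

-- common normal form: process the string one maximal quote-run / plain char at a time
def pvSpec : List Char → List Char
  | [] => []
  | c :: cs =>
      if c = '"' then
        pvEmit (pvLead (c :: cs)) ++ pvSpec ((c :: cs).dropWhile (fun c => c == '"'))
      else c :: pvSpec cs
termination_by cs => cs.length
decreasing_by
  · simp_all
    exact List.length_dropWhile_le _ _
  · simp

theorem pvSpec_nil : pvSpec [] = [] := by rw [pvSpec]

theorem pvDropWhile_eq_drop (cs : List Char) :
    cs.dropWhile (fun c => c == '"') = cs.drop (pvLead cs) := by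
  simp only [pvLead]
  have h := List.drop_left (l₁ := cs.takeWhile (fun c => c == '"')) (l₂ := cs.dropWhile (fun c => c == '"'))
  rw [List.takeWhile_append_dropWhile] at h
  exact h.symm

theorem pvTakeWhile_eq_replicate (cs : List Char) :
    cs.takeWhile (fun c => c == '"') = List.replicate (pvLead cs) '"' := by
  rw [List.eq_replicate_iff]
  refine ⟨rfl, fun b hb => ?_⟩
  have := List.mem_takeWhile_imp hb
  simpa using this

theorem pvSpec_eq (cs : List Char) :
    pvSpec cs = pvEmit (pvLead cs) ++ pvSpec (cs.dropWhile (fun c => c == '"')) := by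
  match cs with
  | [] => simp [pvSpec_nil, pvLead_nil, pvEmit]
  | c :: cs' =>
    rw [pvSpec]
    split
    · rfl
    · rename_i hc
      rw [pvLead_cons, if_neg hc, List.dropWhile_cons]
      simp only [show (c == '"') = false by simpa using hc, Bool.false_eq_true, if_false]
      rw [pvEmit, if_neg (by omega), List.replicate_zero, List.nil_append]
      conv_rhs => rw [pvSpec]
      rw [if_neg hc]

theorem pvLead_pos_head (cs : List Char) (h : 1 ≤ pvLead cs) : ∃ t, cs = '"' :: t := by
  match cs with
  | [] => simp [pvLead_nil] at h
  | c :: t =>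
    rw [pvLead_cons] at h
    by_cases hc : c = '"'
    · exact ⟨t, by rw [hc]⟩
    · simp [hc] at h

theorem pvPrefix_lead (cs : List Char) (h : ['"', '"', '"'] <+: cs) : 3 ≤ pvLead cs := by
  obtain ⟨t, ht⟩ := h
  subst ht
  simp [pvLead_cons]

theorem pvLead_ge3_prefix (cs : List Char) (h : 3 ≤ pvLead cs) : ['"', '"', '"'] <+: cs := by
  obtain ⟨t1, h1⟩ := pvLead_pos_head cs (by omega)
  subst h1
  rw [pvLead_cons, if_pos rfl] at h
  obtain ⟨t2, h2⟩ := pvLead_pos_head t1 (by omega)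
  subst h2
  rw [pvLead_cons, if_pos rfl] at h
  obtain ⟨t3, h3⟩ := pvLead_pos_head t2 (by omega)
  subst h3
  exact ⟨t3, rfl⟩

-- a string with no occurrence of '"""' is left unchanged by pvSpec
theorem pvSpec_no_triple (n : Nat) : ∀ (cs : List Char), cs.length ≤ n →
    (∀ j : Nat, ¬ ['"', '"', '"'] <+: cs.drop j) → pvSpec cs = cs := by
  induction n with
  | zero =>
    intro cs hlen _
    have hnil : cs = [] := List.length_eq_zero_iff.mp (by omega)
    rw [hnil]
    exact pvSpec_nil
  | succ n ih =>
    intro cs hlen h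
    match cs with
    | [] => exact pvSpec_nil
    | c :: cs' =>
      rw [pvSpec]
      split
      · rename_i hc
        have hlead1 : 1 ≤ pvLead (c :: cs') := by rw [pvLead_cons, if_pos hc]; omega
        have hlead : pvLead (c :: cs') ≤ 2 := by
          by_contra hgt
          exact h 0 (by simpa using pvLead_ge3_prefix (c :: cs') (by omega))
        rw [pvEmit, if_neg (by omega), ← pvTakeWhile_eq_replicate]
        have hrec : pvSpec ((c :: cs').dropWhile (fun c => c == '"')) =
            (c :: cs').dropWhile (fun c => c == '"') := by
          apply ih
          · rw [pvDropWhile_eq_drop]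
            simp only [List.length_drop, List.length_cons]
            have h1 : 1 ≤ pvLead (c :: cs') := hlead1
            have hlen' : cs'.length + 1 ≤ n + 1 := by simpa using hlen
            omega
          · intro j
            rw [pvDropWhile_eq_drop, List.drop_drop]
            exact h _
        rw [hrec, List.takeWhile_append_dropWhile]
      · rename_i hc
        congr 1
        apply ih
        · simp at hlen ⊢; omega
        · intro j
          have := h (j + 1)
          simpa using this

-- pvSpec distributes over a concatenation whose left part has no triple quote and
-- does not end in a double quote
theorem pvSpec_append (n : Nat) : ∀ (p X : List Char), p.length ≤ n →
    (∀ j : Nat, ¬ ['"', '"', '"'] <+: p.drop j) →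
    p.getLast? ≠ some '"' → pvSpec (p ++ X) = p ++ pvSpec X := by
  induction n with
  | zero =>
    intro p X hlen _ _
    have hnil : p = [] := List.length_eq_zero_iff.mp (by omega)
    rw [hnil]
    simp
  | succ n ih =>
    intro p X hlen hocc hlast
    match p with
    | [] => simp
    | c :: p' =>
      have hne : ∃ x ∈ c :: p', ¬ (x == '"') = true := by
        refine ⟨(c :: p').getLast (by simp), List.getLast_mem _, ?_⟩
        rw [List.getLast?_eq_some_getLast (l := c :: p') (by simp)] at hlast
        simp only [ne_eq, Option.some.injEq] at hlast
        simpa using hlast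
      rw [List.cons_append, pvSpec]
      split
      · rename_i hc
        have htw : ((c :: p') ++ X).takeWhile (fun c => c == '"') =
            (c :: p').takeWhile (fun c => c == '"') := by
          rw [List.takeWhile_append]
          split
          · rename_i hlen2
            exfalso
            obtain ⟨x, hx1, hx2⟩ := hne
            have heq : (c :: p').takeWhile (fun c => c == '"') = c :: p' :=
              List.IsPrefix.eq_of_length (List.takeWhile_prefix _) hlen2
            have hx1' : x ∈ (c :: p').takeWhile (fun c => c == '"') := by
              rw [heq]; exact hx1
            have := List.mem_takeWhile_imp hx1'
            exact hx2 (by simpa using this)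
          · rfl
        have hdw : ((c :: p') ++ X).dropWhile (fun c => c == '"') =
            (c :: p').dropWhile (fun c => c == '"') ++ X := by
          rw [List.dropWhile_append]
          split
          · rename_i hemp
            exfalso
            obtain ⟨x, hx1, hx2⟩ := hne
            rw [List.isEmpty_iff] at hemp
            have happ := List.takeWhile_append_dropWhile (p := fun c => c == '"') (l := c :: p')
            rw [hemp, List.append_nil] at happ
            have hx1' : x ∈ (c :: p').takeWhile (fun c => c == '"') := by
              rw [happ]; exact hx1
            have := List.mem_takeWhile_imp hx1'
            exact hx2 (by simpa using this)
          · rfl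
        have hlead : pvLead ((c :: p') ++ X) = pvLead (c :: p') := by
          simp only [pvLead]
          rw [htw]
        have hleadle : pvLead (c :: p') ≤ 2 := by
          by_contra hgt
          exact hocc 0 (by simpa using pvLead_ge3_prefix (c :: p') (by omega))
        have hlead1 : 1 ≤ pvLead (c :: p') := by rw [pvLead_cons, if_pos hc]; omega
        rw [show (c :: (p' ++ X) : List Char) = (c :: p') ++ X by simp]
        rw [hlead, hdw]
        have hrec : pvSpec ((c :: p').dropWhile (fun c => c == '"') ++ X) =
            (c :: p').dropWhile (fun c => c == '"') ++ pvSpec X := by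
          apply ih
          · rw [pvDropWhile_eq_drop]
            simp only [List.length_drop, List.length_cons]
            have h1 : 1 ≤ pvLead (c :: p') := hlead1
            have hlen' : p'.length + 1 ≤ n + 1 := by simpa using hlen
            omega
          · intro j
            rw [pvDropWhile_eq_drop, List.drop_drop]
            exact hocc _
          · rw [pvDropWhile_eq_drop, List.getLast?_drop]
            split
            · simp
            · exact hlast
        rw [hrec, pvEmit, if_neg (by omega), ← pvTakeWhile_eq_replicate, ← List.append_assoc,
          List.takeWhile_append_dropWhile]
      · rename_i hc
        rw [List.cons_append]
        congr 1
        match p' with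
        | [] => simp
        | b :: t =>
          apply ih
          · simp at hlen ⊢; omega
          · intro j
            have := hocc (j + 1)
            simpa using this
          · rwa [List.getLast?_cons_cons] at hlast

theorem pvAdvance_eq (cs : List Char) (p : Nat) :
    pvAdvance cs p = p + pvLead (cs.drop p) := by
  rw [pvAdvance]
  split
  · rename_i hlt
    have hd : cs.drop p = cs[p] :: cs.drop (p + 1) := List.drop_eq_getElem_cons hlt
    split
    · rename_i hq
      rw [pvAdvance_eq cs (p + 1), hd, pvLead_cons, if_pos hq]
      omega
    · rename_i hq
      rw [hd, pvLead_cons, if_neg hq]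
      omega
  · rename_i hge
    rw [List.drop_eq_nil_of_le (by omega), pvLead_nil]
    omega
termination_by cs.length - p

-- A's escape loop from position `start` computes pvSpec of the remaining suffix
theorem pvEscA_eq_spec (n : Nat) : ∀ (cs : List Char) (start : Nat), cs.length - start ≤ n →
    pvEscA cs start = pvSpec (cs.drop start) := by
  induction n with
  | zero =>
    intro cs start hn
    have hlen : cs.length ≤ start := by omega
    rw [pvEscA]
    simp only [List.drop_eq_nil_of_le hlen, pvSpec_nil]
    have hneg : PySem.Chars.findFrom cs ['"', '"', '"'] (start : Int) none = -1 := by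
      by_contra hpos
      obtain ⟨hle, hsp, hpre, _⟩ := pvFind_facts cs start hpos
      have := hpre.length_le
      simp at this
      omega
    rw [dif_pos hneg, PySem.List.slice_from cs (by positivity), Int.toNat_natCast,
      List.drop_eq_nil_of_le hlen]
  | succ n ih =>
    intro cs start hn
    rw [pvEscA]
    split
    · rename_i hpos
      rw [PySem.List.slice_from cs (by positivity), Int.toNat_natCast]
      by_cases hle : start ≤ cs.length
      · have hnt : ¬ ['"', '"', '"'] <:+: cs.drop start :=
          (PySem.Chars.findFrom_natCast_eq_neg_one_iff cs _ start hle).mp hpos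
        rw [pvSpec_no_triple (cs.drop start).length _ (le_refl _)]
        intro j hj
        exact hnt (List.IsInfix.trans hj.isInfix (List.drop_suffix j _).isInfix)
      · rw [List.drop_eq_nil_of_le (by omega), pvSpec_nil]
    · rename_i hpos
      obtain ⟨hle, hsp, hpre, hmin⟩ := pvFind_facts cs start hpos
      set pos := PySem.Chars.findFrom cs ['"', '"', '"'] (start : Int) none with hposdef
      set p := pos.toNat with hpdef
      set q := pvLead (cs.drop p) with hqdef
      have hps : start ≤ p := by omega
      have hq3 : 3 ≤ q := pvPrefix_lead _ hpre
      have hplen : p + 3 ≤ cs.length := by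
        have := hpre.length_le
        simp at this
        omega
      have he : pvAdvance cs p = p + q := pvAdvance_eq cs p
      have hslice : PySem.List.slice cs (some (start : Int)) (some pos) =
          (cs.drop start).take (p - start) := by
        rw [show pos = ((p : Nat) : Int) by omega, PySem.List.slice_natCast]
      set P := (cs.drop start).take (p - start) with hPdef
      have hPlen : P.length = p - start := by
        simp [hPdef]
        omega
      have hPocc : ∀ j : Nat, ¬ ['"', '"', '"'] <+: P.drop j := by
        intro j hj
        have hjlen : j + 3 ≤ P.length := by
          have := hj.length_le
          simp at this
          omega
        have h1 : P.drop j = (cs.drop (start + j)).take (p - start - j) := by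
          rw [hPdef, List.drop_take, List.drop_drop]
        have h2 : ['"', '"', '"'] <+: cs.drop (start + j) :=
          List.IsPrefix.trans (h1 ▸ hj) (List.take_prefix _ _)
        exact hmin (start + j) (by omega) (by omega) h2
      have hPlast : P.getLast? ≠ some '"' := by
        intro hlast
        have hne : P ≠ [] := by intro h0; rw [h0] at hlast; simp at hlast
        have hplen1 : 1 ≤ p - start := by
          by_contra h0
          apply hne
          rw [hPdef, List.take_eq_nil_iff]
          left; omega
        have hcq : cs[p - 1]? = some '"' := by
          rw [List.getLast?_eq_getElem?, hPlen] at hlast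
          rw [hPdef, List.getElem?_take, if_pos (by omega), List.getElem?_drop] at hlast
          rw [show p - 1 = start + (p - start - 1) by omega]
          exact hlast
        obtain ⟨t, ht⟩ := hpre
        have hd : cs.drop (p - 1) = '"' :: cs.drop p := by
          rw [List.drop_eq_getElem_cons (show p - 1 < cs.length by omega)]
          congr 1
          · rw [List.getElem?_eq_getElem (show p - 1 < cs.length by omega)] at hcq
            exact Option.some.inj hcq
          · congr 1; omega
        have htr : ['"', '"', '"'] <+: cs.drop (p - 1) := by
          rw [hd, ← ht]
          exact ⟨'"' :: t, rfl⟩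
        exact hmin (p - 1) (by omega) (by omega) htr
      have hPX : cs.drop start = P ++ cs.drop p := by
        conv_lhs => rw [← List.take_append_drop (p - start) (cs.drop start)]
        rw [List.drop_drop, show start + (p - start) = p by omega]
      dsimp only
      rw [hslice, hPX, pvSpec_append P.length P (cs.drop p) (le_refl _) hPocc hPlast]
      rw [pvSpec_eq (cs.drop p), pvDropWhile_eq_drop, List.drop_drop, ← hqdef]
      rw [he, ih cs (p + q) (by omega)]
      rw [pvEmit, if_pos hq3, show p + q - p = q by omega]
      simp [List.append_assoc]

-- ===== the B side: the run-length fold computes pvSpec =====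
theorem pvFoldB_factor : ∀ (cs : List Char) (out : List Char) (run : Nat),
    cs.foldl pvStepB (out, run) =
      (out ++ (cs.foldl pvStepB ([], run)).1, (cs.foldl pvStepB ([], run)).2) := by
  intro cs
  induction cs with
  | nil => simp
  | cons c cs ih =>
    intro out run
    simp only [List.foldl_cons]
    by_cases hc : c = '"'
    · simp only [pvStepB, if_pos hc]
      exact ih out (run + 1)
    · simp only [pvStepB, if_neg hc, List.nil_append]
      rw [ih (out ++ pvEmit run ++ [c]) 0, ih (pvEmit run ++ [c]) 0]
      simp

theorem pvB_main : ∀ (cs : List Char) (run : Nat),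
    (cs.foldl pvStepB ([], run)).1 ++ pvEmit ((cs.foldl pvStepB ([], run)).2) =
      pvEmit (run + pvLead cs) ++ pvSpec (cs.dropWhile (fun c => c == '"')) := by
  intro cs
  induction cs with
  | nil =>
    intro run
    simp [pvLead_nil, pvSpec_nil]
  | cons c cs ih =>
    intro run
    simp only [List.foldl_cons]
    by_cases hc : c = '"'
    · simp only [pvStepB, if_pos hc]
      rw [ih (run + 1), pvLead_cons, if_pos hc, List.dropWhile_cons,
        show (c == '"') = true by simpa using hc]
      simp only [if_true]
      congr 2
      omega
    · simp only [pvStepB, if_neg hc, List.nil_append]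
      rw [pvFoldB_factor cs (pvEmit run ++ [c]) 0]
      have hmain := ih 0
      rw [Nat.zero_add, ← pvSpec_eq cs] at hmain
      rw [pvLead_cons, if_neg hc, Nat.add_zero, List.dropWhile_cons,
        show (c == '"') = false by simpa using hc]
      simp only [Bool.false_eq_true, if_false]
      conv_rhs => rw [pvSpec]
      rw [if_neg hc]
      simp only [List.append_assoc]
      rw [hmain]
      simp

theorem pvEscB_eq_spec (cs : List Char) : pvEscB cs = pvSpec cs := by
  unfold pvEscB
  dsimp only
  rw [pvB_main cs 0, Nat.zero_add, ← pvSpec_eq cs]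

theorem pvEsc_eq (cs : List Char) : pvEscA cs 0 = pvEscB cs := by
  rw [pvEscB_eq_spec, pvEscA_eq_spec cs.length cs 0 (by omega), List.drop_zero]

-- ===== the wrappers: manual append loop over split[:-1] plus split[-1] = join over all lines =====
theorem pvPyGet_neg_one {α : Type} (l : List α) (h : l ≠ []) :
    PySem.List.pyGet? l (-1) = l.getLast? := by
  unfold PySem.List.pyGet? PySem.List.pyIdx?
  have hl : 1 ≤ l.length := by cases l; simp at h; simp
  rw [List.getLast?_eq_getElem?]
  rw [if_neg (by norm_num), if_pos (by omega)]
  simp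

theorem pvJoin_build (sep : List Char) (f : List Char → List Char) :
    ∀ (l : List (List Char)) (last : List Char), l.getLast? = some last →
      l.dropLast.flatMap (fun line => f line ++ sep) ++ f last =
        PySem.Chars.join sep (l.map f) := by
  intro l
  induction l with
  | nil => intro last hlast; simp at hlast
  | cons a t ih =>
    intro last hlast
    cases t with
    | nil =>
      simp at hlast
      subst hlast
      simp [PySem.Chars.join_singleton]
    | cons b t' =>
      have hlast' : (b :: t').getLast? = some last := by
        rw [← hlast, List.getLast?_cons_cons]
      simp only [List.dropLast_cons₂, List.flatMap_cons, List.map_cons]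
      rw [List.append_assoc, ih last hlast']
      simp only [List.map_cons]
      rw [PySem.Chars.join_cons_cons]

-- the manual append loop over L[:-1] plus L[-1] equals the (guarded) sep.join over all lines
theorem pvWrap_eq (L : List (List Char)) (rep : List Char) (last : List Char)
    (hlast : L.getLast? = some last) :
    L.dropLast.foldl (fun res line => res ++ pvEscA line 0 ++ ['\n'] ++ rep) ['"', '"', '"'] ++
        pvEscA last 0 ++ ['"', '"', '"'] =
      ['"', '"', '"'] ++
        PySem.Chars.join (if 1 < (L.map pvEscB).length then '\n' :: rep else []) (L.map pvEscB) ++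
        ['"', '"', '"'] := by
  match L with
  | [] => simp at hlast
  | [a] =>
    simp only [List.getLast?_singleton, Option.some.injEq] at hlast
    subst hlast
    simp only [List.dropLast_singleton, List.foldl_nil, List.map_cons, List.map_nil,
      List.length_cons, List.length_nil]
    rw [if_neg (by omega), PySem.Chars.join_singleton, pvEsc_eq]
  | a :: b :: t =>
    have hlen : 1 < ((a :: b :: t).map pvEscB).length := by simp
    rw [if_pos hlen]
    have hfun : (fun (res line : List Char) => res ++ pvEscA line 0 ++ ['\n'] ++ rep)
        = (fun res line => res ++ (pvEscB line ++ ('\n' :: rep))) := by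
      funext res line
      rw [pvEsc_eq]
      simp
    rw [hfun]
    rw [PySem.List.foldl_append_eq_flatMap (fun line => pvEscB line ++ ('\n' :: rep))
      (a :: b :: t).dropLast ['"', '"', '"']]
    rw [pvEsc_eq]
    simp only [List.append_assoc]
    congr 1
    rw [← pvJoin_build ('\n' :: rep) pvEscB (a :: b :: t) last hlast]
    simp [List.append_assoc]

theorem go_ne_nil (isB : Char → Bool) : ∀ (cs cur : List Char) (acc : List (List Char)),
    (acc ≠ [] ∨ cur ≠ [] ∨ cs ≠ []) → PySem.Chars.splitlines.go isB cs cur acc ≠ [] := by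
  intro cs cur acc h
  fun_induction PySem.Chars.splitlines.go isB cs cur acc
  case case1 => simp_all [List.isEmpty_iff]
  case case2 => simp
  all_goals (rename_i ih; exact ih (by simp))

theorem pvSplitlines_ne_nil (cs : List Char) (h : cs ≠ []) :
    PySem.Chars.splitlines cs ≠ [] := by
  unfold PySem.Chars.splitlines
  exact go_ne_nil _ cs [] [] (Or.inr (Or.inr h))

-- ===== VERDICT (by name: the statement is the Claim_ definition above) =====
theorem get_stringified_string_with_indent_spec : Claim_equal_get_stringified_string_with_indent := by
  intro s indent _ hpre
  unfold Spec_get_stringified_string_with_indent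
  unfold get_stringified_string_with_indent get_stringified_string_with_indent_alt
  dsimp only
  have hcs : s.toList ≠ [] := fun h => hpre (String.toList_eq_nil_iff.mp h)
  have hsp : PySem.Chars.splitlines s.toList ≠ [] := pvSplitlines_ne_nil _ hcs
  obtain ⟨last, hlast⟩ := Option.isSome_iff_exists.mp (List.getLast?_isSome.mpr hsp)
  rw [pvPyGet_neg_one _ hsp, hlast]
  dsimp only
  rw [PySem.List.slice_to_neg_one]
  exact congrArg String.ofList
    (pvWrap_eq (PySem.Chars.splitlines s.toList) (PySem.List.pyRepeat [' '] indent) last hlast)
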